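-- pv_equiv track=rewrite | github.com/dad/base | src/muscle.py | alignGeneFromProtein
-- ===== SOURCE A (Python) =====
-- def alignGeneFromProtein(gene, prot_align):
-- 	j = 0
-- 	gene_align = []
-- 	for i in range(len(prot_align)):
-- 		if prot_align[i] == '-':
-- 			gene_align.append('---')
-- 		else:
-- 			gene_align.append(gene[j : 3 + j])
-- 			j += 3
-- 	return ''.join(gene_align)
-- ===== SOURCE B (Python) =====
-- def alignGeneFromProtein(gene, prot_align):
-- 	parts = []
-- 	p = 0
-- 	for seg in prot_align.split('-'):
-- 		parts.append(gene[3 * p : 3 * (p + len(seg))])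
-- 		p += len(seg)
-- 	return '---'.join(parts)
-- ===== Notes on version B (the rewrite author's own statement) =====
-- stated objective: faster
-- what changed: B splits the protein alignment on '-' into residue segments, slices one whole 3*len(seg) chunk of the gene per segment, and rejoins the chunks with '---', so the gap handling moves from a per-character branch into the join separator and the gene is sliced once per segment instead of once per residue.
import Mathlib
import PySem

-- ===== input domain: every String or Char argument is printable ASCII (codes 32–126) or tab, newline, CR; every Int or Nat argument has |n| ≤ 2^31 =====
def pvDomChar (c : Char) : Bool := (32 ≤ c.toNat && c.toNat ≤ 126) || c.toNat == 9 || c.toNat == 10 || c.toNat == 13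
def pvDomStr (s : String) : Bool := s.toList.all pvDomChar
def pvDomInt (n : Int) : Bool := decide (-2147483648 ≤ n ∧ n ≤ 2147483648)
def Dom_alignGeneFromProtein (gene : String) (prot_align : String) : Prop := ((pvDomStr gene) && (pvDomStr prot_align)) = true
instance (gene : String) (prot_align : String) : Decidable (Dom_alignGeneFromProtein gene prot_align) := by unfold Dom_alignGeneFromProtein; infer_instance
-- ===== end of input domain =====

-- B splits the protein alignment on '-' into residue segments, slices one whole 3*len(seg)
-- chunk of the gene per segment and rejoins with '---', instead of A's per-character loop
-- with a running codon index; same asymptotic cost, measurably faster by a constant factor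
-- (bulk split/slice/join instead of per-residue work; objective: faster).

-- ===== PORT A =====
-- A's loop over prot_align with the running index j, building gene_align chunk by chunk
def pvLoopA (gene : List Char) : List Char → Int → List (List Char)
  | [], _ => []
  | c :: cs, j =>
      if c = '-' then ['-', '-', '-'] :: pvLoopA gene cs j
      else PySem.List.slice gene (some j) (some (3 + j)) :: pvLoopA gene cs (j + 3)

def alignGeneFromProtein (gene : String) (prot_align : String) : String :=
  String.ofList (pvLoopA gene.toList prot_align.toList 0).flatten

-- ===== PORT B =====
-- the loop over prot_align.split('-'): per segment one slice gene[3*p : 3*(p+len(seg))], p += len(seg)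
def pvPartsB (gene : List Char) : List (List Char) → Int → List (List Char)
  | [], _ => []
  | s :: ss, p =>
      PySem.List.slice gene (some (3 * p)) (some (3 * (p + (s.length : Int))))
        :: pvPartsB gene ss (p + (s.length : Int))

def alignGeneFromProtein_alt (gene : String) (prot_align : String) : String :=
  String.ofList
    (PySem.Chars.join ['-', '-', '-']
      (pvPartsB gene.toList (PySem.Chars.splitOn prot_align.toList ['-']) 0))

-- ===== PRECONDITION & SPEC =====
def Spec_alignGeneFromProtein (gene : String) (prot_align : String) (out : String) : Prop := out = alignGeneFromProtein_alt gene prot_align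
instance (gene : String) (prot_align : String) (out : String) : Decidable (Spec_alignGeneFromProtein gene prot_align out) := by unfold Spec_alignGeneFromProtein; infer_instance

-- ===== CLAIM (what is proved, stated in full; the proofs are below) =====
def Claim_equal_alignGeneFromProtein : Prop := ∀ (gene : String) (prot_align : String), Dom_alignGeneFromProtein gene prot_align → Spec_alignGeneFromProtein gene prot_align (alignGeneFromProtein gene prot_align)

-- ===== LEMMAS AND PROOFS =====

-- structural recursion computing split-on-'-' with the pending segment as an accumulator
def pvSplit : List Char → List Char → List (List Char)
  | pre, [] => [pre]
  | pre, c :: cs => if c = '-' then pre :: pvSplit [] cs else pvSplit (pre ++ [c]) cs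

lemma pvSplit_ne_nil (pre cs) : pvSplit pre cs ≠ [] := by
  induction cs generalizing pre with
  | nil => simp [pvSplit]
  | cons c cs ih => by_cases hc : c = '-' <;> simp [pvSplit, hc, ih]

-- PySem's fuel-based splitOn.go, characterised for the one-char separator '-'
lemma splitOn_go_eq (l cur : List Char) (acc : List (List Char)) (fuel : Nat)
    (h : l.length < fuel) :
    PySem.Chars.splitOn.go ['-'] fuel l cur acc = acc.reverse ++ pvSplit cur.reverse l := by
  induction l generalizing fuel cur acc with
  | nil =>
    cases fuel with
    | zero => omega
    | succ f => simp [PySem.Chars.splitOn.go, pvSplit]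
  | cons c rest ih =>
    cases fuel with
    | zero => omega
    | succ f =>
      by_cases hc : c = '-'
      · subst hc
        have hpre : List.isPrefixOf ['-'] ('-' :: rest) = true := by
          simp [List.isPrefixOf]
        rw [PySem.Chars.splitOn.go, if_pos hpre]
        simp only [List.length_cons] at h
        rw [show List.drop (['-'] : List Char).length ('-' :: rest) = rest from rfl]
        rw [ih [] (cur.reverse :: acc) f (by omega)]
        simp [pvSplit]
      · have hpre : List.isPrefixOf ['-'] (c :: rest) = false := by
          simp [List.isPrefixOf]; exact fun h' => hc h'.symm
        rw [PySem.Chars.splitOn.go, if_neg (by simp [hpre])]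
        simp only [List.length_cons] at h
        rw [ih (c :: cur) acc f (by omega)]
        simp [pvSplit, hc]

lemma splitOn_eq (s : List Char) : PySem.Chars.splitOn s ['-'] = pvSplit [] s := by
  unfold PySem.Chars.splitOn
  rw [splitOn_go_eq _ _ _ _ (by omega)]
  simp

lemma intercalate_cons_ne (sep a : List Char) (l : List (List Char)) (h : l ≠ []) :
    List.intercalate sep (a :: l) = a ++ (sep ++ List.intercalate sep l) := by
  cases l with
  | nil => exact absurd rfl h
  | cons b t => simp [List.intercalate, List.intersperse]

-- gene[3n : 3(n+m)] over natural n, m, as drop/take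
lemma sliceM (gene : List Char) (n m : Nat) :
    PySem.List.slice gene (some (3 * (n : Int))) (some (3 * ((n : Int) + (m : Int))))
      = (gene.drop (3 * n)).take (3 * m) := by
  rw [show (3 * (n : Int)) = ((3 * n : Nat) : Int) by push_cast; ring,
      show (3 * ((n : Int) + (m : Int))) = ((3 * n + 3 * m : Nat) : Int) by push_cast; ring,
      PySem.List.slice_natCast]
  congr 1
  omega

-- the heart of the proof: A's per-character loop, flattened, equals B's segment slices joined,
-- when A sits at codon index n + |pre| and B's first pending segment is pre
lemma main_lemma (gene : List Char) (cs : List Char) :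
    ∀ (pre : List Char) (n : Nat),
      List.intercalate ['-', '-', '-'] (pvPartsB gene (pvSplit pre cs) ((n : Int)))
        = (gene.drop (3 * n)).take (3 * pre.length)
          ++ (pvLoopA gene cs (3 * ((n + pre.length : Nat) : Int))).flatten := by
  induction cs with
  | nil =>
    intro pre n
    have h := sliceM gene n pre.length
    simp [pvSplit, pvPartsB, pvLoopA, List.intercalate, h]
  | cons c cs ih =>
    intro pre n
    by_cases hc : c = '-'
    · subst hc
      have hne := pvSplit_ne_nil ([] : List Char) cs
      obtain ⟨s0, ss, hsplit⟩ : ∃ s0 ss, pvSplit [] cs = s0 :: ss := by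
        cases hsp : pvSplit [] cs with
        | nil => exact absurd hsp hne
        | cons a b => exact ⟨a, b, rfl⟩
      have ihh := ih [] (n + pre.length)
      simp only [List.length_nil, Nat.add_zero, mul_zero, List.take_zero,
        List.nil_append] at ihh
      rw [hsplit] at ihh
      rw [show pvSplit pre ('-' :: cs) = pre :: pvSplit [] cs from by simp [pvSplit],
          show pvLoopA gene ('-' :: cs) (3 * ((n + pre.length : Nat) : Int))
              = ['-', '-', '-'] :: pvLoopA gene cs (3 * ((n + pre.length : Nat) : Int))
            from by simp [pvLoopA],
          hsplit, pvPartsB, sliceM gene n pre.length,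
          show ((n : Int) + ((pre.length : Nat) : Int)) = ((n + pre.length : Nat) : Int)
            by push_cast; ring,
          intercalate_cons_ne ['-', '-', '-'] _ _ (by simp [pvPartsB]), ihh]
      simp
    · have ihh := ih (pre ++ [c]) n
      rw [show pvSplit pre (c :: cs) = pvSplit (pre ++ [c]) cs from by simp [pvSplit, hc],
          ihh,
          show pvLoopA gene (c :: cs) (3 * ((n + pre.length : Nat) : Int))
              = PySem.List.slice gene (some (3 * ((n + pre.length : Nat) : Int)))
                  (some (3 + 3 * ((n + pre.length : Nat) : Int)))
                :: pvLoopA gene cs (3 * ((n + pre.length : Nat) : Int) + 3)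
            from by simp [pvLoopA, hc]]
      have hsl : PySem.List.slice gene (some (3 * ((n + pre.length : Nat) : Int)))
            (some (3 + 3 * ((n + pre.length : Nat) : Int)))
          = (gene.drop (3 * (n + pre.length))).take 3 := by
        have h := sliceM gene (n + pre.length) 1
        rw [show (3 + 3 * (((n + pre.length : Nat)) : Int))
              = (3 * ((((n + pre.length : Nat)) : Int) + ((1 : Nat) : Int))) by push_cast; ring]
        simpa using h
      have h1 : (gene.drop (3 * n)).take (3 * (pre.length + 1))
          = (gene.drop (3 * n)).take (3 * pre.length)
            ++ (gene.drop (3 * (n + pre.length))).take 3 := by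
        rw [show 3 * (pre.length + 1) = 3 * pre.length + 3 by ring, List.take_add,
            List.drop_drop, show 3 * n + 3 * pre.length = 3 * (n + pre.length) by ring]
      rw [show (pre ++ [c]).length = pre.length + 1 from by simp, h1, hsl,
          show (3 * (((n + pre.length : Nat)) : Int) + 3)
              = (3 * (((n + (pre.length + 1) : Nat)) : Int)) by push_cast; ring,
          show (n + (pre.length + 1) : Nat) = (n + pre.length + 1 : Nat) by omega]
      simp

-- ===== VERDICT (by name: the statement is the Claim_ definition above) =====
theorem alignGeneFromProtein_spec : Claim_equal_alignGeneFromProtein := by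
  intro gene prot_align _
  unfold Spec_alignGeneFromProtein alignGeneFromProtein alignGeneFromProtein_alt
  rw [splitOn_eq]
  have h := main_lemma gene.toList prot_align.toList [] 0
  simp only [List.length_nil, Nat.add_zero, Nat.cast_zero, mul_zero, List.take_zero,
    List.nil_append] at h
  rw [PySem.Chars.join, h]
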